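-- pv_equiv track=rewrite | github.com/samuelo49/DS-ALGOS | Hashstructure/wordappend.py | wordAppend
-- ===== SOURCE A (Python) =====
-- def wordAppend(array):
--     result = []
--     lookup = {}
--     for char in array:
--         if char not in lookup:
--             lookup[char] = 1
--         else:
--             lookup[char] += 1
--
--         if lookup[char] % 2 == 0:
--             result.append(char)
--
--     if len(result) >= 1:
--         return ''.join(result)
--     else:
--         return ''
-- ===== SOURCE B (Python) =====
-- def wordAppend(array):
--     # Staged algorithm: group the positions of each char, keep every even-numbered
--     # occurrence (the 2nd, 4th, ...: odd index within the group), then emit the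
--     # kept positions in increasing order.
--     positions = {}
--     for i, c in enumerate(array):
--         positions.setdefault(c, []).append(i)
--     keep = sorted(p for ps in positions.values()
--                   for j, p in enumerate(ps) if j % 2 == 1)
--     return ''.join(array[p] for p in keep)
-- ===== Notes on version B (the rewrite author's own statement) =====
-- stated objective: alternative
-- what changed: Replaces the single-pass counting-dict state machine with a staged group-and-merge algorithm: group all positions by char, take each char's odd-indexed (2nd, 4th, ...) occurrence positions, sort the kept positions and join the chars found there.
import Mathlib
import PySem

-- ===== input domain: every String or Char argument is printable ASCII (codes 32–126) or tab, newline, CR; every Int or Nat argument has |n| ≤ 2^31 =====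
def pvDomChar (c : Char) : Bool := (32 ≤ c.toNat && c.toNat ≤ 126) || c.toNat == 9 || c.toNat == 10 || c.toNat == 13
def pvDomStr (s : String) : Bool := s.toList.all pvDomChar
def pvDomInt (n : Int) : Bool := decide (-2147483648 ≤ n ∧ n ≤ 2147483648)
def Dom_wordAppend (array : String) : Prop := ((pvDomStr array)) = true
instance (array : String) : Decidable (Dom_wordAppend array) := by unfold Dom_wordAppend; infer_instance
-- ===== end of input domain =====

-- B replaces A's single-pass counting-dict state machine by a staged group-by-char / select
-- odd-indexed occurrences / sort-positions algorithm (alternative; similar cost).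

-- ===== PORT A =====
-- the dict after processing `char`: insert 1 the first time, else increment
def wordAppendCount (lookup : PySem.Dict Char Int) (char : Char) : PySem.Dict Char Int :=
  if lookup.contains char = false then lookup.insert char 1
  else lookup.modify char 0 (· + 1)

-- one iteration of A's for-loop: state = (result, lookup)
def wordAppendStepA (st : List Char × PySem.Dict Char Int) (char : Char) :
    List Char × PySem.Dict Char Int :=
  if PySem.Int.mod ((wordAppendCount st.2 char).getD char 0) 2 = 0 then
    (st.1 ++ [char], wordAppendCount st.2 char)
  else (st.1, wordAppendCount st.2 char)

def wordAppend (array : String) : String :=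
  let st := array.toList.foldl wordAppendStepA ([], PySem.Dict.empty)
  -- ''.join of single-character strings = String.ofList of the chars (exact); String.ofList [] = ""
  if st.1.length ≥ 1 then String.ofList st.1 else ""

-- ===== PORT B =====
-- 'positions.setdefault(c, []).append(i)' = Dict.modify c [] (· ++ [i]);
-- 'sorted(...)' = PySem.List.sorted; 'array[p]' for the in-range kept position p = pyGetD (exact here).
def wordAppend_alt (array : String) : String :=
  let xs := array.toList
  let positions := (PySem.List.enumerate xs 0).foldl
      (fun d p => d.modify p.2 [] (· ++ [p.1])) PySem.Dict.empty
  let keep := PySem.List.sorted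
      (positions.values.flatMap (fun ps =>
        ((PySem.List.enumerate ps 0).filter (fun q => PySem.Int.mod q.1 2 == 1)).map (·.2)))
      (fun p => p) false
  String.ofList (keep.map (fun p => PySem.List.pyGetD xs p ' '))

-- ===== PRECONDITION & SPEC =====
def Spec_wordAppend (array : String) (out : String) : Prop := out = wordAppend_alt array
instance (array : String) (out : String) : Decidable (Spec_wordAppend array out) := by unfold Spec_wordAppend; infer_instance

-- ===== CLAIM (what is proved, stated in full; the proofs are below) =====
def Claim_equal_wordAppend : Prop := ∀ (array : String), Dom_wordAppend array → Spec_wordAppend array (wordAppend array)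

-- ===== LEMMAS AND PROOFS =====

-- the chars of the suffix `l` kept by the task when the already-seen prefix is `pre`
def waSel (pre : List Char) : List Char → List Char
  | [] => []
  | c :: rest =>
      if (pre.count c + 1) % 2 = 0 then c :: waSel (pre ++ [c]) rest
      else waSel (pre ++ [c]) rest

-- B's building blocks, named for the proofs (definitionally the port's subterms)
def waPred (xs : List Char) (p : Int × Char) : Bool :=
  (PySem.List.slice xs none (some (p.1 + 1))).count p.2 % 2 == 0

def waOcc (xs : List Char) (c : Char) : List Int :=
  ((PySem.List.enumerate xs 0).filter (fun p => p.2 == c)).map (·.1)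

def waSelOdd (l : List Int) : List Int :=
  ((PySem.List.enumerate l 0).filter (fun q => PySem.Int.mod q.1 2 == 1)).map (·.2)

def waK (xs : List Char) : List Int :=
  ((PySem.List.enumerate xs 0).filter (waPred xs)).map (·.1)

-- A-side: the updated dict looks up as "count + 1 at char, unchanged elsewhere"
lemma wa_getD_count (d : PySem.Dict Char Int) (char x : Char) :
    (wordAppendCount d char).getD x 0
      = if x = char then d.getD char 0 + 1 else d.getD x 0 := by
  unfold wordAppendCount
  by_cases h : d.contains char = true
  · simp only [h, Bool.true_eq_false, if_false, PySem.Dict.getD_modify]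
  · have h' : d.contains char = false := by simpa using h
    rw [if_pos h', PySem.Dict.getD_insert]
    by_cases hx : x = char
    · subst hx
      simp [PySem.Dict.getD_of_not_contains d 0 h']
    · simp [hx]

-- A-side: under the invariant "lookup holds the prefix counts" the loop appends waSel
lemma wa_loopA (l : List Char) (pre res : List Char) (d : PySem.Dict Char Int)
    (hd : ∀ c : Char, d.getD c 0 = (pre.count c : Int)) :
    (l.foldl wordAppendStepA (res, d)).1 = res ++ waSel pre l := by
  induction l generalizing pre res d with
  | nil => simp [waSel]
  | cons char rest ih =>
    simp only [List.foldl_cons]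
    have hc : (wordAppendCount d char).getD char 0 = ((pre.count char + 1 : Nat) : Int) := by
      rw [wa_getD_count, if_pos rfl, hd]; push_cast; ring
    have hd' : ∀ c : Char, (wordAppendCount d char).getD c 0 = ((pre ++ [char]).count c : Int) := by
      intro c
      rw [wa_getD_count]
      by_cases hx : c = char
      · subst hx
        rw [if_pos rfl, hd, List.count_append]
        push_cast; simp
      · rw [if_neg hx, hd, List.count_append]
        have : ¬char = c := fun h => hx h.symm
        simp [this]
    have hmod : PySem.Int.mod ((wordAppendCount d char).getD char 0) 2
        = (((pre.count char + 1) % 2 : Nat) : Int) := by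
      rw [hc]
      exact_mod_cast PySem.Int.mod_natCast (pre.count char + 1) 2
    by_cases hp : (pre.count char + 1) % 2 = 0
    · have hz : PySem.Int.mod ((wordAppendCount d char).getD char 0) 2 = 0 := by
        rw [hmod, hp]; rfl
      have hA : wordAppendStepA (res, d) char = (res ++ [char], wordAppendCount d char) := by
        unfold wordAppendStepA; rw [if_pos hz]
      rw [hA, ih (pre ++ [char]) _ _ hd']
      simp [waSel, hp]
    · have hnz : ¬ PySem.Int.mod ((wordAppendCount d char).getD char 0) 2 = 0 := by
        rw [hmod]
        intro h
        exact hp (by exact_mod_cast h)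
      have hA : wordAppendStepA (res, d) char = (res, wordAppendCount d char) := by
        unfold wordAppendStepA; rw [if_neg hnz]
      rw [hA, ih (pre ++ [char]) _ _ hd']
      simp [waSel, hp]

-- the in-order filter of the full list by the even-prefix-count test is waSel
lemma wa_filterSel (full : List Char) (l pre : List Char) (h : full = pre ++ l) :
    (((PySem.List.enumerate l (pre.length : Int)).filter (waPred full)).map (·.2))
      = waSel pre l := by
  induction l generalizing pre with
  | nil => simp [PySem.List.enumerate_nil, waSel]
  | cons c rest ih =>
    rw [PySem.List.enumerate_cons]
    have hslice : PySem.List.slice full none (some ((pre.length : Int) + 1))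
        = pre ++ [c] := by
      have : ((pre.length : Int) + 1) = ((pre.length + 1 : Nat) : Int) := by push_cast; ring
      rw [this, PySem.List.slice_to_natCast, h]
      simp [List.take_append]
    have hcnt : (PySem.List.slice full none (some ((pre.length : Int) + 1))).count c
        = pre.count c + 1 := by
      rw [hslice, List.count_append, List.count_singleton]; simp
    have htail : ((pre.length : Int) + 1) = (((pre ++ [c]).length : Nat) : Int) := by
      push_cast [List.length_append]; simp
    by_cases hp : (pre.count c + 1) % 2 = 0
    · rw [List.filter_cons_of_pos (by simp [waPred, hcnt, hp])]
      simp only [List.map_cons]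
      rw [htail, ih (pre ++ [c]) (by simp [h])]
      simp [waSel, hp]
    · rw [List.filter_cons_of_neg (by simp [waPred, hcnt, hp])]
      rw [htail, ih (pre ++ [c]) (by simp [h])]
      simp [waSel, hp]

-- enumerate of an appended element
lemma wa_enum_append {α : Type} (xs : List α) (x : α) (s : Int) :
    PySem.List.enumerate (xs ++ [x]) s
      = PySem.List.enumerate xs s ++ [(s + xs.length, x)] := by
  induction xs generalizing s with
  | nil => simp [PySem.List.enumerate_cons, PySem.List.enumerate_nil]
  | cons a t ih =>
    simp only [List.cons_append, PySem.List.enumerate_cons, ih (s + 1), List.length_cons]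
    push_cast; ring_nf

-- an enumerated pair indexes its own char: bounds and lookup
lemma wa_enum_mem (l : List Char) : ∀ (pre : List Char) (p : Int × Char),
    p ∈ PySem.List.enumerate l (pre.length : Int) →
      (pre.length : Int) ≤ p.1 ∧ p.1 < pre.length + l.length ∧
        PySem.List.pyGetD (pre ++ l) p.1 ' ' = p.2 := by
  induction l with
  | nil => intro pre p hp; simp [PySem.List.enumerate_nil] at hp
  | cons c rest ih =>
    intro pre p hp
    rw [PySem.List.enumerate_cons] at hp
    rcases List.mem_cons.mp hp with h | h
    · subst h
      refine ⟨le_refl _, by push_cast [List.length_cons]; omega, ?_⟩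
      simp only [PySem.List.pyGetD_natCast]
      rw [List.getD_eq_getElem?_getD, List.getElem?_append_right (le_refl _)]
      simp
    · have h' := ih (pre ++ [c]) p (by
        have : ((pre ++ [c]).length : Int) = (pre.length : Int) + 1 := by
          push_cast [List.length_append]; simp
        rw [this]; exact h)
      rcases h' with ⟨h1, h2, h3⟩
      have e : pre ++ [c] ++ rest = pre ++ c :: rest := by simp
      rw [e] at h3
      have hlen : ((pre ++ [c]).length : Int) = (pre.length : Int) + 1 := by
        push_cast [List.length_append]; simp
      rw [hlen] at h1 h2
      refine ⟨by omega, ?_, h3⟩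
      push_cast [List.length_cons] at h2 ⊢
      omega

-- first components of an enumeration are strictly increasing
lemma wa_fst_pairwise (xs : List Char) (s : Int) :
    ((PySem.List.enumerate xs s).map (·.1)).Pairwise (· < ·) := by
  rw [PySem.List.map_fst_enumerate]
  exact PySem.List.pairwise_lt_pyRange_one s (s + xs.length)

-- first components of any filtered enumeration are strictly increasing (hence nodup)
lemma wa_filter_fst_pairwise (xs : List Char) (P : Int × Char → Bool) :
    (((PySem.List.enumerate xs 0).filter P).map (·.1)).Pairwise (· < ·) := by
  have hsub : (((PySem.List.enumerate xs 0).filter P).map (·.1)).Sublist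
      ((PySem.List.enumerate xs 0).map (·.1)) :=
    List.Sublist.map _ List.filter_sublist
  exact (wa_fst_pairwise xs 0).sublist hsub

-- the occurrence list of c has length count c
lemma wa_occ_length (xs : List Char) (c : Char) :
    (waOcc xs c).length = xs.count c := by
  unfold waOcc
  rw [List.length_map, ← List.countP_eq_length_filter]
  have : xs = (PySem.List.enumerate xs 0).map (·.2) := (PySem.List.map_snd_enumerate xs 0).symm
  rw [List.count_eq_countP]
  conv_rhs => rw [this]
  rw [List.countP_map]
  rfl

-- selecting the odd-indexed occurrences of c = filtering c's positions by the even-prefix-count test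
lemma wa_c1 (xs : List Char) (c : Char) :
    waSelOdd (waOcc xs c)
      = ((PySem.List.enumerate xs 0).filter (fun p => p.2 == c && waPred xs p)).map (·.1) := by
  induction xs using List.reverseRecOn with
  | nil => simp [waOcc, waSelOdd, PySem.List.enumerate_nil]
  | append_singleton xs x ih =>
    have henum : PySem.List.enumerate (xs ++ [x]) 0
        = PySem.List.enumerate xs 0 ++ [((xs.length : Int), x)] := by
      rw [wa_enum_append]; simp
    -- the predicate over the extended list agrees with the one over xs on the old pairs
    have hpredcong : ∀ p ∈ PySem.List.enumerate xs 0,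
        waPred (xs ++ [x]) p = waPred xs p := by
      intro p hp
      have hb := wa_enum_mem xs [] p (by simpa using hp)
      rcases hb with ⟨h1, h2, _⟩
      simp only [List.length_nil, Nat.cast_zero] at h1 h2
      unfold waPred
      have h01 : (0:Int) ≤ p.1 + 1 := by omega
      rw [PySem.List.slice_to _ h01, PySem.List.slice_to _ h01,
        List.take_append_of_le_length (by omega)]
    have hocc : waOcc (xs ++ [x]) c
        = waOcc xs c ++ (if x = c then [(xs.length : Int)] else []) := by
      unfold waOcc
      rw [henum, List.filter_append, List.map_append]
      congr 1
      simp only [List.filter_singleton]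
      rcases eq_or_ne x c with hxc | hxc
      · subst hxc; simp
      · have hb : (x == c) = false := beq_eq_false_iff_ne.mpr hxc
        simp [hb, hxc]
    have hpredx : waPred (xs ++ [x]) ((xs.length : Int), x)
        = ((xs.count x + 1) % 2 == 0) := by
      unfold waPred
      have : ((xs.length : Int) + 1) = (((xs ++ [x]).length : Nat) : Int) := by
        push_cast [List.length_append]; simp
      rw [this, PySem.List.slice_to_natCast]
      rw [List.take_of_length_le (le_refl _)]
      simp [List.count_append]
    have hsel : ∀ (l : List Int) (i : Int),
        waSelOdd (l ++ [i])
          = waSelOdd l ++ (if (l.length % 2 = 1) then [i] else []) := by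
      intro l i
      unfold waSelOdd
      rw [wa_enum_append, List.filter_append, List.map_append]
      congr 1
      simp only [List.filter_singleton]
      have hm : PySem.Int.mod ((0 : Int) + (l.length : Nat)) 2 = ((l.length % 2 : Nat) : Int) := by
        rw [zero_add]
        exact_mod_cast PySem.Int.mod_natCast l.length 2
      by_cases hl : l.length % 2 = 1
      · have hc : (PySem.Int.mod ((0 : Int) + (l.length : Nat)) 2 == 1) = true := by
          rw [hm, hl]; simp
        rw [hc]
        simp [hl]
      · have h0 : l.length % 2 = 0 := by omega
        have hc : (PySem.Int.mod ((0 : Int) + (l.length : Nat)) 2 == 1) = false := by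
          rw [hm, h0]; simp
        rw [hc]
        simp [hl]
    rw [hocc]
    rw [henum, List.filter_append, List.map_append]
    rw [List.filter_congr (fun p hp => by rw [hpredcong p hp] :
      ∀ p ∈ PySem.List.enumerate xs 0,
        (p.2 == c && waPred (xs ++ [x]) p) = (p.2 == c && waPred xs p))]
    rw [← ih]
    by_cases hxc : x = c
    · subst hxc
      rw [if_pos rfl, hsel, wa_occ_length]
      congr 1
      simp only [List.filter_singleton, beq_self_eq_true, Bool.true_and, hpredx]
      rcases Nat.mod_two_eq_zero_or_one (List.count x xs) with h | h
      · have h1 : (List.count x xs + 1) % 2 = 1 := by omega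
        simp [h, h1]
      · have h1 : (List.count x xs + 1) % 2 = 0 := by omega
        simp [h, h1]
    · rw [if_neg hxc, List.append_nil]
      have : List.filter (fun p => p.2 == c && waPred (xs ++ [x]) p) [((xs.length : Int), x)] = [] := by
        simp only [List.filter_singleton]
        have hb : (x == c) = false := beq_eq_false_iff_ne.mpr hxc
        simp [hb]
      rw [this, List.map_nil, List.append_nil]

-- the grouping loop: positions.getD c [] is the in-order occurrence list of c
lemma wa_getD_positions (xs : List Char) (c : Char) :
    (((PySem.List.enumerate xs 0).foldl
        (fun d p => d.modify p.2 [] (· ++ [p.1])) PySem.Dict.empty).getD c [])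
      = waOcc xs c := by
  have hfold : ((PySem.List.enumerate xs 0).foldl
        (fun d p => d.modify p.2 [] (· ++ [p.1])) PySem.Dict.empty)
      = (((PySem.List.enumerate xs 0).map (fun p => (p.2, p.1))).foldl
        (fun d q => d.modify q.1 [] (· ++ [q.2])) PySem.Dict.empty) := by
    rw [List.foldl_map]
  rw [hfold, PySem.Dict.getD_foldl_modify_append]
  simp only [PySem.Dict.getD_empty, List.nil_append]
  rw [List.filter_map, List.map_map]
  rfl

-- membership in a per-char selected list forces the char at that position
lemma wa_memKc (xs : List Char) (c : Char) (i : Int)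
    (h : i ∈ ((PySem.List.enumerate xs 0).filter (fun p => p.2 == c && waPred xs p)).map (·.1)) :
    PySem.List.pyGetD xs i ' ' = c ∧ i ∈ waK xs := by
  rcases List.mem_map.mp h with ⟨p, hpmem, hpi⟩
  rcases List.mem_filter.mp hpmem with ⟨hpe, hpP⟩
  rcases Bool.and_eq_true_iff.mp hpP with ⟨hc, hP⟩
  have hlook := (wa_enum_mem xs [] p (by simpa using hpe)).2.2
  simp only [List.nil_append] at hlook
  constructor
  · rw [hpi] at hlook
    rw [hlook]
    exact eq_of_beq hc
  · unfold waK
    exact List.mem_map.mpr ⟨p, List.mem_filter.mpr ⟨hpe, hP⟩, hpi⟩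

-- ===== VERDICT (by name: the statement is the Claim_ definition above) =====
theorem wordAppend_spec : Claim_equal_wordAppend := by
  intro array _
  unfold Spec_wordAppend wordAppend wordAppend_alt
  simp only
  set xs := array.toList with hxs
  -- A's loop output
  have hA := wa_loopA xs [] [] PySem.Dict.empty
    (by intro c; rw [PySem.Dict.getD_empty]; simp)
  rw [hA]
  simp only [List.nil_append]
  -- B's dict
  set D := (PySem.List.enumerate xs 0).foldl
      (fun d p => d.modify p.2 [] (· ++ [p.1])) PySem.Dict.empty with hD
  have hkeysnd : D.keys.Nodup := by
    rw [hD]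
    exact PySem.Dict.nodup_keys_foldl_modify_key (PySem.List.enumerate xs 0)
      (fun p => p.2) [] (fun _ p => (· ++ [p.1])) PySem.Dict.empty (by simp)
  have hvals : D.values = D.keys.map (fun k => D.getD k []) :=
    PySem.Dict.values_eq_map_keys D hkeysnd []
  have hgetD : ∀ c, D.getD c [] = waOcc xs c := fun c => wa_getD_positions xs c
  have hkeysmem : ∀ c : Char, c ∈ D.keys ↔ c ∈ xs := by
    intro c
    rw [hD, PySem.Dict.keys_foldl_modify_key]
    have : (PySem.List.enumerate xs 0).map (fun p => p.2) = xs :=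
      PySem.List.map_snd_enumerate xs 0
    rw [this]
    simp [PySem.Set.mem_update]
  -- the flattened selection
  have hflat : D.values.flatMap (fun ps =>
        ((PySem.List.enumerate ps 0).filter (fun q => PySem.Int.mod q.1 2 == 1)).map (·.2))
      = (D.keys.map (fun c =>
          ((PySem.List.enumerate xs 0).filter (fun p => p.2 == c && waPred xs p)).map (·.1))).flatten := by
    rw [hvals, List.flatMap_def, List.map_map]
    congr 1
    apply List.map_congr_left
    intro c _
    show waSelOdd (D.getD c []) = _
    rw [hgetD c, wa_c1]
  rw [hflat]
  -- each per-char list is nodup, lists for distinct chars are disjoint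
  have hKc_nodup : ∀ c : Char,
      (((PySem.List.enumerate xs 0).filter (fun p => p.2 == c && waPred xs p)).map (·.1)).Nodup :=
    fun c => (wa_filter_fst_pairwise xs _).nodup
  have hflat_nodup : ((D.keys.map (fun c =>
      ((PySem.List.enumerate xs 0).filter (fun p => p.2 == c && waPred xs p)).map (·.1))).flatten).Nodup := by
    rw [List.nodup_flatten]
    constructor
    · intro a ha
      rcases List.mem_map.mp ha with ⟨c, _, hc⟩
      rw [← hc]; exact hKc_nodup c
    · refine List.Pairwise.map _ ?_ hkeysnd
      intro c c' hne i hi hi'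
      have h1 := (wa_memKc xs c i hi).1
      have h2 := (wa_memKc xs c' i hi').1
      exact hne (h1.symm.trans h2)
  -- waK is nodup and strictly increasing
  have hK_pairwise : (waK xs).Pairwise (· < ·) := wa_filter_fst_pairwise xs _
  have hK_nodup : (waK xs).Nodup := hK_pairwise.nodup
  -- same membership, hence a permutation
  have hmem : ∀ i : Int, i ∈ (D.keys.map (fun c =>
      ((PySem.List.enumerate xs 0).filter (fun p => p.2 == c && waPred xs p)).map (·.1))).flatten
      ↔ i ∈ waK xs := by
    intro i
    constructor
    · intro h
      rcases List.mem_flatten.mp h with ⟨l, hl, hil⟩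
      rcases List.mem_map.mp hl with ⟨c, _, hc⟩
      exact (wa_memKc xs c i (hc ▸ hil)).2
    · intro h
      unfold waK at h
      rcases List.mem_map.mp h with ⟨p, hpmem, hpi⟩
      rcases List.mem_filter.mp hpmem with ⟨hpe, hP⟩
      have hchar : p.2 ∈ xs := by
        have := PySem.List.map_snd_enumerate xs (0 : Int)
        rw [← this]
        exact List.mem_map.mpr ⟨p, hpe, rfl⟩
      apply List.mem_flatten.mpr
      refine ⟨((PySem.List.enumerate xs 0).filter (fun q => q.2 == p.2 && waPred xs q)).map (·.1), ?_, ?_⟩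
      · exact List.mem_map.mpr ⟨p.2, (hkeysmem p.2).mpr hchar, rfl⟩
      · exact List.mem_map.mpr ⟨p, List.mem_filter.mpr ⟨hpe, by simp [hP]⟩, hpi⟩
  have hperm : (waK xs).Perm ((D.keys.map (fun c =>
      ((PySem.List.enumerate xs 0).filter (fun p => p.2 == c && waPred xs p)).map (·.1))).flatten) :=
    (List.perm_ext_iff_of_nodup hK_nodup hflat_nodup).mpr (fun a => (hmem a).symm)
  -- the sort names the in-order selection
  have hsorted : PySem.List.sorted ((D.keys.map (fun c =>
      ((PySem.List.enumerate xs 0).filter (fun p => p.2 == c && waPred xs p)).map (·.1))).flatten)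
      (fun p => p) false = waK xs :=
    PySem.List.sorted_eq_of_perm_of_pairwise_lt _ _ _ hperm hK_pairwise
  rw [hsorted]
  -- reading the chars back off the kept positions gives the filtered chars
  have hread : (waK xs).map (fun p => PySem.List.pyGetD xs p ' ')
      = ((PySem.List.enumerate xs 0).filter (waPred xs)).map (·.2) := by
    unfold waK
    rw [List.map_map]
    apply List.map_congr_left
    intro p hp
    have := (wa_enum_mem xs [] p (by simpa using List.mem_filter.mp hp |>.1)).2.2
    simpa using this
  rw [hread]
  have hB := wa_filterSel xs xs [] (by simp)
  simp only [List.length_nil, Nat.cast_zero] at hB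
  rw [hB]
  rcases waSel [] xs with _ | ⟨a, l⟩
  · simp
  · simp
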